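-- pv_equiv track=rewrite | github.com/pablocael/bigO-estimator | main.py | myFuncNplusM
-- ===== SOURCE A (Python) =====
-- def myFuncNplusM(v, w):
--     result = []
--     a = 1
--     for i in range(0,len(v)):
--             a = a + i*i*i*i
--             result.append(a)
--
--     for i in range(0,len(w)):
--             a = a + i*i*i*i
--             result.append(a)
--
--     return result
-- ===== SOURCE B (Python) =====
-- def myFuncNplusM(v, w):
--     # Closed-form Faulhaber sum: G(k) = sum of i**4 for i in 0..k (G(-1) == 0)
--     def G(k):
--         return k * (k + 1) * (2 * k + 1) * (3 * k * k + 3 * k - 1) // 30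
--     result = [1 + G(i) for i in range(len(v))]
--     base = 1 + G(len(v) - 1)
--     result += [base + G(j) for j in range(len(w))]
--     return result
-- ===== Notes on version B (the rewrite author's own statement) =====
-- stated objective: alternative
-- what changed: Replaced the running-sum loops (an accumulator updated with i**4 and appended) with a closed-form Faulhaber polynomial G(k) = k(k+1)(2k+1)(3k^2+3k-1)//30 for the prefix sum of fourth powers, so each output element is computed directly from its index with no carried state.
import Mathlib
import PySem

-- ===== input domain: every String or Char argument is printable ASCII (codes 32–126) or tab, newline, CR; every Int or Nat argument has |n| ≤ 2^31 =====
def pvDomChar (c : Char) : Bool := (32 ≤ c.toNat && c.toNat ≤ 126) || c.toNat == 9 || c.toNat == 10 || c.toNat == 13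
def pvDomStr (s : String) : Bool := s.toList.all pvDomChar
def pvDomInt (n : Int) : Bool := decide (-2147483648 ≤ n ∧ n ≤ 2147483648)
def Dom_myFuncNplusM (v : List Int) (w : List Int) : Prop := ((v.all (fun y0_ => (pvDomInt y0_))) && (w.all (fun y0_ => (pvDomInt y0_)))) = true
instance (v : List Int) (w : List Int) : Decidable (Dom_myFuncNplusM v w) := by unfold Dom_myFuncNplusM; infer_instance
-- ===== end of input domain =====

-- B replaces A's running-sum accumulation with the closed-form Faulhaber polynomial for prefix sums of i^4 (alternative decomposition, same cost).
-- ===== PORT A =====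
def myFuncNplusM (v : List Int) (w : List Int) : List Int :=
  -- result = []; a = 1
  -- for i in range(0, len(v)): a = a + i*i*i*i; result.append(a)
  let s1 := (PySem.List.pyRange 0 (v.length : Int) 1).foldl
      (fun (p : Int × List Int) i => (p.1 + i*i*i*i, p.2 ++ [p.1 + i*i*i*i])) (1, [])
  -- for i in range(0, len(w)): a = a + i*i*i*i; result.append(a)
  let s2 := (PySem.List.pyRange 0 (w.length : Int) 1).foldl
      (fun (p : Int × List Int) i => (p.1 + i*i*i*i, p.2 ++ [p.1 + i*i*i*i])) s1
  s2.2

-- ===== PORT B =====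
-- G(k) = k*(k+1)*(2*k+1)*(3*k*k+3*k-1) // 30
def pvG (k : Int) : Int := PySem.Int.floordiv (k * (k + 1) * (2 * k + 1) * (3 * k * k + 3 * k - 1)) 30

def myFuncNplusM_alt (v : List Int) (w : List Int) : List Int :=
  let result := (List.range v.length).map (fun i : Nat => 1 + pvG (i : Int))
  let base := 1 + pvG ((v.length : Int) - 1)
  result ++ (List.range w.length).map (fun j : Nat => base + pvG (j : Int))

-- ===== PRECONDITION & SPEC =====
def Spec_myFuncNplusM (v : List Int) (w : List Int) (out : List Int) : Prop := out = myFuncNplusM_alt v w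
instance (v : List Int) (w : List Int) (out : List Int) : Decidable (Spec_myFuncNplusM v w out) := by unfold Spec_myFuncNplusM; infer_instance

-- ===== CLAIM (what is proved, stated in full; the proofs are below) =====
def Claim_equal_myFuncNplusM : Prop := ∀ (v : List Int) (w : List Int), Dom_myFuncNplusM v w → Spec_myFuncNplusM v w (myFuncNplusM v w)

-- ===== LEMMAS AND PROOFS =====

-- ===== VERDICT (by name: the statement is the Claim_ definition above) =====
-- sum of i^4 for i < n
def pvS (n : Nat) : Int := ∑ i ∈ Finset.range n, (i : Int)^4

lemma pvS_succ (n : Nat) : pvS (n+1) = pvS n + (n : Int)^4 := by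
  simp [pvS, Finset.sum_range_succ]

lemma pvPoly (n : Nat) :
    ((n:Int)-1) * (((n:Int)-1)+1) * (2*((n:Int)-1)+1) * (3*((n:Int)-1)*((n:Int)-1)+3*((n:Int)-1)-1)
      = 30 * pvS n := by
  induction n with
  | zero => simp [pvS]
  | succ m ih =>
    rw [pvS_succ]
    push_cast
    push_cast at ih
    nlinarith [ih]

lemma pvG_pred (n : Nat) : pvG ((n:Int) - 1) = pvS n := by
  unfold pvG
  rw [pvPoly n, PySem.Int.floordiv_eq_ediv_of_pos (by norm_num)]
  exact Int.mul_ediv_cancel_left _ (by norm_num)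

lemma pvG_nat (i : Nat) : pvG (i : Int) = pvS (i+1) := by
  have := pvG_pred (i+1)
  have h : ((i+1 : Nat) : Int) - 1 = (i : Int) := by push_cast; ring
  rwa [h] at this

-- A's loop, characterised: folding over range(0,n) from state (a0, res0)
lemma pvLoop (n : Nat) (a0 : Int) (res0 : List Int) :
    (PySem.List.pyRange 0 (n : Int) 1).foldl
      (fun (p : Int × List Int) i => (p.1 + i*i*i*i, p.2 ++ [p.1 + i*i*i*i])) (a0, res0)
    = (a0 + pvS n, res0 ++ (List.range n).map (fun i => a0 + pvS (i+1))) := by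
  induction n generalizing res0 with
  | zero => simp [pvS]
  | succ m ih =>
    have hcast : ((m+1 : Nat) : Int) = (m : Int) + 1 := by push_cast; ring
    rw [hcast, PySem.List.pyRange_one_succ_right (by positivity), List.foldl_append, ih]
    simp only [List.foldl_cons, List.foldl_nil, List.range_succ, List.map_append, List.map_cons,
      List.map_nil, List.append_assoc]
    have h4 : a0 + pvS (m + 1) = a0 + pvS m + (m : Int) * m * m * m := by
      rw [pvS_succ]; ring
    rw [h4]

theorem myFuncNplusM_spec : Claim_equal_myFuncNplusM := by
  intro v w _
  unfold Spec_myFuncNplusM myFuncNplusM myFuncNplusM_alt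
  dsimp only
  rw [pvLoop v.length 1 [], pvLoop w.length (1 + pvS v.length)]
  simp only [List.nil_append]
  have h1 : (List.range v.length).map (fun i => 1 + pvS (i+1))
      = (List.range v.length).map (fun i : Nat => 1 + pvG (i : Int)) := by
    apply List.map_congr_left
    intro i _
    rw [pvG_nat]
  have h2 : (List.range w.length).map (fun j => 1 + pvS v.length + pvS (j+1))
      = (List.range w.length).map (fun j : Nat => 1 + pvG ((v.length : Int) - 1) + pvG (j : Int)) := by
    apply List.map_congr_left
    intro j _
    rw [pvG_nat, pvG_pred]
  rw [h1, h2]
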